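-- pv_equiv track=rewrite | github.com/Just-A-Freshman/ComfyUI-Wiring | Utils.py | filter_pure_link
-- ===== SOURCE A (Python) =====
-- from typing import Dict, Set, Sequence, Generator, Any, List
--
-- def filter_pure_link(links: Sequence[Sequence[int]]) -> set:
--     # eg: links = [[1, 3], [4, 5]]，表示1号输出到3号...
--     input_map: Dict[int, Set] = {}
--     output_map: Dict[int, Set] = {}
--
--     for left_node, right_node in links:
--         if left_node not in output_map:
--             output_map[left_node] = set()
--         output_map[left_node].add(right_node)
--
--         if right_node not in input_map:
--             input_map[right_node] = set()
--         input_map[right_node].add(left_node)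
--
--     pure_link = set()
--     for left_node, right_node in links:
--         if left_node in output_map and len(output_map[left_node]) != 1:
--             continue
--         if right_node in input_map and len(input_map[right_node]) != 1:
--             continue
--         pure_link.add((left_node, right_node))
--
--     return pure_link
-- ===== SOURCE B (Python) =====
-- def filter_pure_link(links):
--     # no index structures at all: a link is pure iff every link sharing its left
--     # endpoint has the same right, and every link sharing its right has the same left
--     pure_link = set()
--     for left_node, right_node in links:
--         if all(r == right_node for l, r in links if l == left_node) and \
--            all(l == left_node for l, r in links if r == right_node):
--             pure_link.add((left_node, right_node))
--     return pure_link
-- ===== Notes on version B (the rewrite author's own statement) =====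
-- stated objective: simpler
-- what changed: A builds two dicts of neighbour sets in a first pass and then rescans the links testing set sizes; B builds no index at all: for each link it checks directly, by scanning the link list, that every link sharing its left endpoint has the same right and every link sharing its right endpoint has the same left.
import Mathlib
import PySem

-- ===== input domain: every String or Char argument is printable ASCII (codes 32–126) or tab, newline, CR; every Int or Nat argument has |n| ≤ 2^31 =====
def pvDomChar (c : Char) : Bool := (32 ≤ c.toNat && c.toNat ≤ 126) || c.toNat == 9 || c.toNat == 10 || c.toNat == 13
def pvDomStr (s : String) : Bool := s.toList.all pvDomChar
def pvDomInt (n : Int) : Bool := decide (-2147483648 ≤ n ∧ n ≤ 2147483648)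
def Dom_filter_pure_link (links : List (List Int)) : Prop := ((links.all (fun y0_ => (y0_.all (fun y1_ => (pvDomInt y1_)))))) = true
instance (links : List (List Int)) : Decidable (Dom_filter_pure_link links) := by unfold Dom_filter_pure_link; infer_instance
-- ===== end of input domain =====

-- B drops A's two dicts of neighbour sets entirely and instead, per link, directly scans
-- the link list for a conflicting link sharing one endpoint (simpler, index-free decomposition).

-- shared helper: Python's `for left, right in row`-unpacking of one row (ValueError rows fall to the no-op arm, excluded by Pre_)
def pvUnpack {β : Type} (f : β → Int → Int → β) : β → List Int → β :=
  fun m row => match row with | [l, r] => f m l r | _ => m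

-- ===== PORT A =====
-- rows that are not 2-element lists make Python raise ValueError; they are excluded by Pre_
-- (the `| _ => m` branches are only totalisation, never reached under Pre_).
def filter_pure_link (links : List (List Int)) : List (Int × Int) :=
  let maps := links.foldl
    (pvUnpack (fun m left_node right_node =>
      (m.1.modify right_node PySem.Set.empty (fun s => PySem.Set.add s left_node),
       m.2.modify left_node PySem.Set.empty (fun s => PySem.Set.add s right_node))))
    (PySem.Dict.empty, PySem.Dict.empty)
  let input_map := maps.1
  let output_map := maps.2
  links.foldl
    (pvUnpack (fun pure_link left_node right_node =>
      if output_map.contains left_node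
          && PySem.Set.len (output_map.getD left_node PySem.Set.empty) != 1 then pure_link
      else if input_map.contains right_node
          && PySem.Set.len (input_map.getD right_node PySem.Set.empty) != 1 then pure_link
      else PySem.Set.add pure_link (left_node, right_node)))
    PySem.Set.empty

-- ===== PORT B =====
-- `all(… for l, r in links if cond)` over the link rows; malformed rows (which raise in
-- Python, excluded by Pre_) fall to the vacuous `true` arm.
def pvAll2 (rows : List (List Int)) (f : Int → Int → Bool) : Bool :=
  rows.all (fun row => match row with | [l, r] => f l r | _ => true)

def filter_pure_link_alt (links : List (List Int)) : List (Int × Int) :=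
  links.foldl
    (pvUnpack (fun pure_link left_node right_node =>
      if pvAll2 links (fun l r => !(l == left_node) || (r == right_node))
          && pvAll2 links (fun l r => !(r == right_node) || (l == left_node))
      then PySem.Set.add pure_link (left_node, right_node)
      else pure_link))
    (PySem.Set.empty : PySem.Set (Int × Int))

-- ===== PRECONDITION & SPEC =====
-- Pre_ excludes exactly the rows on which Python's two-element unpacking raises ValueError.
def Pre_filter_pure_link (links : List (List Int)) : Prop :=
  ∀ row ∈ links, row.length = 2
instance (links : List (List Int)) : Decidable (Pre_filter_pure_link links) := by
  unfold Pre_filter_pure_link; infer_instance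

def pvWitness_filter_pure_link : List (List Int) := [[1, 2], [1, 3], [4, 5]]

def Spec_filter_pure_link (links : List (List Int)) (out : List (Int × Int)) : Prop := out = filter_pure_link_alt links
instance (links : List (List Int)) (out : List (Int × Int)) : Decidable (Spec_filter_pure_link links out) := by unfold Spec_filter_pure_link; infer_instance

-- ===== CLAIM (what is proved, stated in full; the proofs are below) =====
def Claim_equal_filter_pure_link : Prop := ∀ (links : List (List Int)), Dom_filter_pure_link links → Pre_filter_pure_link links → Spec_filter_pure_link links (filter_pure_link links)

-- ===== LEMMAS AND PROOFS =====

/-- The extracted pairs of the two-element rows (all rows, under `Pre_`). -/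
def pvPairs (links : List (List Int)) : List (Int × Int) :=
  links.filterMap (fun row => match row with | [l, r] => some (l, r) | _ => none)

/-- A `for left, right in links` fold is a fold over the extracted pairs. -/
theorem foldl_unpack {β : Type} (f : β → Int → Int → β) (links : List (List Int)) (init : β) :
    links.foldl (pvUnpack f) init
      = (pvPairs links).foldl (fun m p => f m p.1 p.2) init := by
  induction links generalizing init with
  | nil => rfl
  | cons row rest ih =>
      rcases row with _ | ⟨a, _ | ⟨b, _ | ⟨c, t⟩⟩⟩ <;> simp [pvPairs, pvUnpack] at * <;>
        exact ih _

/-- An `all(… for l, r in links)` is an `all` over the extracted pairs. -/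
theorem pvAll2_eq_pairs (links : List (List Int)) (f : Int → Int → Bool) :
    pvAll2 links f = (pvPairs links).all (fun p => f p.1 p.2) := by
  induction links with
  | nil => rfl
  | cons row rest ih =>
      rcases row with _ | ⟨a, _ | ⟨b, _ | ⟨c, t⟩⟩⟩ <;> simp [pvPairs, pvAll2] at * <;>
        simp [ih]

/-- Value of the grouping dict built by `modify … (Set.add · (v p))`. -/
theorem getD_foldl_group (k v : (Int × Int) → Int) (ps : List (Int × Int))
    (d : PySem.Dict Int (PySem.Set Int)) (l : Int) :
    (ps.foldl (fun d p => d.modify (k p) PySem.Set.empty (fun s => PySem.Set.add s (v p))) d).getD l PySem.Set.empty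
      = ((ps.filter (fun p => k p == l)).map v).foldl PySem.Set.add (d.getD l PySem.Set.empty) := by
  induction ps generalizing d with
  | nil => rfl
  | cons p ps ih =>
      simp only [List.foldl_cons, ih, List.filter_cons]
      by_cases h : k p = l
      · simp [h]
      · have : (k p == l) = false := by simpa using h
        simp [this, PySem.Dict.getD_modify, Ne.symm h]

/-- The grouping dict contains every key that occurs. -/
theorem contains_foldl_group (k v : (Int × Int) → Int) (ps : List (Int × Int))
    (d : PySem.Dict Int (PySem.Set Int)) (l : Int) :
    (ps.foldl (fun d p => d.modify (k p) PySem.Set.empty (fun s => PySem.Set.add s (v p))) d).contains l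
      = (d.contains l || ps.any (fun p => k p == l)) := by
  induction ps generalizing d with
  | nil => simp
  | cons p ps ih =>
      simp only [List.foldl_cons, ih, PySem.Dict.contains_modify, List.any_cons]
      by_cases h : l = k p
      · simp [h]
      · have : (l == k p) = false := by simpa using h
        simp [this, BEq.comm]

/-- Splitting port A's simultaneous (input_map, output_map) fold into two folds. -/
theorem maps_fold_split (ps : List (Int × Int)) :
    ps.foldl (fun m p =>
        (m.1.modify p.2 PySem.Set.empty (fun s => PySem.Set.add s p.1),
         m.2.modify p.1 PySem.Set.empty (fun s => PySem.Set.add s p.2)))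
      (PySem.Dict.empty, PySem.Dict.empty)
      = (ps.foldl (fun d p => d.modify p.2 PySem.Set.empty (fun s => PySem.Set.add s p.1)) PySem.Dict.empty,
         ps.foldl (fun d p => d.modify p.1 PySem.Set.empty (fun s => PySem.Set.add s p.2)) PySem.Dict.empty) :=
  PySem.List.foldl_prod_mk
    (fun (d : PySem.Dict Int (PySem.Set Int)) (p : Int × Int) => d.modify p.2 PySem.Set.empty (fun s => PySem.Set.add s p.1))
    (fun (d : PySem.Dict Int (PySem.Set Int)) (p : Int × Int) => d.modify p.1 PySem.Set.empty (fun s => PySem.Set.add s p.2))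
    ps PySem.Dict.empty PySem.Dict.empty

/-- A deduped list containing `r` has length 1 iff every source element is `r`. -/
theorem ofList_len_one_iff (xs : List Int) (r : Int) (hr : r ∈ xs) :
    ((PySem.Set.ofList xs).length = 1) ↔ (∀ x ∈ xs, x = r) := by
  have hmem : ∀ x, x ∈ PySem.Set.ofList xs ↔ x ∈ xs := fun x => PySem.Set.mem_ofList xs x
  have hnd : (PySem.Set.ofList xs).Nodup := PySem.Set.nodup_ofList xs
  constructor
  · intro h1 x hx
    match hS : PySem.Set.ofList xs, h1 with
    | [a], _ =>
      have hxa : x ∈ PySem.Set.ofList xs := (hmem x).mpr hx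
      have hra : r ∈ PySem.Set.ofList xs := (hmem r).mpr hr
      rw [hS] at hxa hra
      simp at hxa hra; omega
  · intro hall
    have hra : r ∈ PySem.Set.ofList xs := (hmem r).mpr hr
    match hS : PySem.Set.ofList xs, hnd, hra with
    | a :: t, hnd', hra' =>
      have hsub : ∀ y ∈ a :: t, y = r := by
        intro y hy
        exact hall y ((hmem y).mp (hS ▸ hy))
      have ha : a = r := hsub a (by simp)
      have ht : t = [] := by
        cases t with
        | nil => rfl
        | cons b t' =>
          have hb : b = r := hsub b (by simp)
          have : a ≠ b := by
            have := List.nodup_cons.mp hnd'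
            intro h; exact this.1 (h ▸ List.mem_cons_self)
          exact absurd (ha.trans hb.symm) this
      simp [ht]

/-- Pointwise: A's "both neighbour sets are singletons" test equals B's direct scan, for a
pair actually occurring in the list. -/
theorem cond_eq (ps : List (Int × Int)) (p : Int × Int) (hp : p ∈ ps) :
    ((!((ps.foldl (fun d q => d.modify q.1 PySem.Set.empty (fun s => PySem.Set.add s q.2)) PySem.Dict.empty).contains p.1
        && PySem.Set.len ((ps.foldl (fun d q => d.modify q.1 PySem.Set.empty (fun s => PySem.Set.add s q.2)) PySem.Dict.empty).getD p.1 PySem.Set.empty) != 1))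
      && (!((ps.foldl (fun d q => d.modify q.2 PySem.Set.empty (fun s => PySem.Set.add s q.1)) PySem.Dict.empty).contains p.2
        && PySem.Set.len ((ps.foldl (fun d q => d.modify q.2 PySem.Set.empty (fun s => PySem.Set.add s q.1)) PySem.Dict.empty).getD p.2 PySem.Set.empty) != 1)))
    = (ps.all (fun q => !(q.1 == p.1) || (q.2 == p.2))
      && ps.all (fun q => !(q.2 == p.2) || (q.1 == p.1))) := by
  rw [contains_foldl_group (fun e => e.1) (fun e => e.2),
      contains_foldl_group (fun e => e.2) (fun e => e.1),
      getD_foldl_group (fun e => e.1) (fun e => e.2),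
      getD_foldl_group (fun e => e.2) (fun e => e.1)]
  have hmem1 : (ps.any (fun e => e.1 == p.1)) = true := List.any_eq_true.mpr ⟨p, hp, by simp⟩
  have hmem2 : (ps.any (fun e => e.2 == p.2)) = true := List.any_eq_true.mpr ⟨p, hp, by simp⟩
  rw [hmem1, hmem2,
      show (PySem.Dict.empty : PySem.Dict Int (PySem.Set Int)).getD p.1 PySem.Set.empty = PySem.Set.empty from rfl,
      show (PySem.Dict.empty : PySem.Dict Int (PySem.Set Int)).getD p.2 PySem.Set.empty = PySem.Set.empty from rfl,
      show (PySem.Set.empty : PySem.Set Int) = [] from rfl,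
      ← PySem.Set.ofList_eq_foldl, ← PySem.Set.ofList_eq_foldl]
  have hr1 : p.2 ∈ (ps.filter (fun e => e.1 == p.1)).map (fun e => e.2) :=
    List.mem_map.mpr ⟨p, List.mem_filter.mpr ⟨hp, by simp⟩, rfl⟩
  have hr2 : p.1 ∈ (ps.filter (fun e => e.2 == p.2)).map (fun e => e.1) :=
    List.mem_map.mpr ⟨p, List.mem_filter.mpr ⟨hp, by simp⟩, rfl⟩
  have h1 := ofList_len_one_iff _ _ hr1
  have h2 := ofList_len_one_iff _ _ hr2
  have e1 : (∀ x ∈ (ps.filter (fun e => e.1 == p.1)).map (fun e => e.2), x = p.2)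
      ↔ (∀ q ∈ ps, (!(q.1 == p.1) || (q.2 == p.2)) = true) := by
    simp only [List.forall_mem_map, List.mem_filter, and_imp, Bool.or_eq_true,
      Bool.not_eq_eq_eq_not, Bool.not_true, beq_eq_false_iff_ne, ne_eq, beq_iff_eq]
    constructor
    · intro h q hq
      by_cases hl : q.1 = p.1
      · exact Or.inr (h q hq hl)
      · exact Or.inl hl
    · intro h q hq hl
      rcases h q hq with h' | h'
      · exact absurd hl h'
      · exact h'
  have e2 : (∀ x ∈ (ps.filter (fun e => e.2 == p.2)).map (fun e => e.1), x = p.1)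
      ↔ (∀ q ∈ ps, (!(q.2 == p.2) || (q.1 == p.1)) = true) := by
    simp only [List.forall_mem_map, List.mem_filter, and_imp, Bool.or_eq_true,
      Bool.not_eq_eq_eq_not, Bool.not_true, beq_eq_false_iff_ne, ne_eq, beq_iff_eq]
    constructor
    · intro h q hq
      by_cases hl : q.2 = p.2
      · exact Or.inr (h q hq hl)
      · exact Or.inl hl
    · intro h q hq hl
      rcases h q hq with h' | h'
      · exact absurd hl h'
      · exact h'
  rw [Bool.eq_iff_iff]
  simp only [Bool.or_true, Bool.true_and, Bool.and_eq_true, Bool.not_eq_true',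
    bne_eq_false_iff_eq, List.all_eq_true, PySem.Set.len, Nat.cast_eq_one]
  rw [h1, h2, e1, e2]

/-- Both ports agree on every input (the malformed rows excluded by `Pre_` are skipped
identically by both ports, so no precondition is needed here). -/
theorem ports_agree (links : List (List Int)) :
    filter_pure_link links = filter_pure_link_alt links := by
  simp only [filter_pure_link, filter_pure_link_alt, foldl_unpack, Prod.mk.eta]
  rw [maps_fold_split]
  refine PySem.List.foldl_congr_mem _ _ _ _ ?_
  intro acc p hp
  rw [pvAll2_eq_pairs, pvAll2_eq_pairs]
  have hc := cond_eq (pvPairs links) p hp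
  set c1 := ((pvPairs links).foldl (fun d q => d.modify q.1 PySem.Set.empty (fun s => PySem.Set.add s q.2)) PySem.Dict.empty).contains p.1
      && PySem.Set.len (((pvPairs links).foldl (fun d q => d.modify q.1 PySem.Set.empty (fun s => PySem.Set.add s q.2)) PySem.Dict.empty).getD p.1 PySem.Set.empty) != 1 with hc1
  set c2 := ((pvPairs links).foldl (fun d q => d.modify q.2 PySem.Set.empty (fun s => PySem.Set.add s q.1)) PySem.Dict.empty).contains p.2
      && PySem.Set.len (((pvPairs links).foldl (fun d q => d.modify q.2 PySem.Set.empty (fun s => PySem.Set.add s q.1)) PySem.Dict.empty).getD p.2 PySem.Set.empty) != 1 with hc2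
  set b := (pvPairs links).all (fun q => !(q.1 == p.1) || (q.2 == p.2))
      && (pvPairs links).all (fun q => !(q.2 == p.2) || (q.1 == p.1)) with hb
  cases h1 : c1 <;> cases h2 : c2 <;>
    simp [h1, h2] at hc ⊢ <;> simp [hc]

-- ===== VERDICT (by name: the statement is the Claim_ definition above) =====
theorem filter_pure_link_spec : Claim_equal_filter_pure_link := by
  intro links _ _
  unfold Spec_filter_pure_link
  exact ports_agree links
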